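-- pv_equiv track=rewrite | github.com/Kaoutherbo/CP-Python | set17.py | petyaString
-- ===== SOURCE A (Python) =====
-- def petyaString(statement1, statement2):
--     statement1 = statement1.lower()
--     statement2 = statement2.lower()
--
--     for letter1, letter2 in zip(statement1, statement2):
--         if letter1 < letter2:
--             return -1
--         elif letter1 > letter2:
--             return 1
--
--     return 0
-- ===== SOURCE B (Python) =====
-- def petyaString(statement1, statement2):
--     s1 = statement1.lower()
--     s2 = statement2.lower()
--     n = min(len(s1), len(s2))
--     a, b = s1[:n], s2[:n]
--     return (a > b) - (a < b)
-- ===== Notes on version B (the rewrite author's own statement) =====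
-- stated objective: idiomatic
-- what changed: Replaces the explicit per-character zip loop with early returns by truncating both lowercased strings to their common length and taking the sign of Python's built-in lexicographic comparison.
import Mathlib
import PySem

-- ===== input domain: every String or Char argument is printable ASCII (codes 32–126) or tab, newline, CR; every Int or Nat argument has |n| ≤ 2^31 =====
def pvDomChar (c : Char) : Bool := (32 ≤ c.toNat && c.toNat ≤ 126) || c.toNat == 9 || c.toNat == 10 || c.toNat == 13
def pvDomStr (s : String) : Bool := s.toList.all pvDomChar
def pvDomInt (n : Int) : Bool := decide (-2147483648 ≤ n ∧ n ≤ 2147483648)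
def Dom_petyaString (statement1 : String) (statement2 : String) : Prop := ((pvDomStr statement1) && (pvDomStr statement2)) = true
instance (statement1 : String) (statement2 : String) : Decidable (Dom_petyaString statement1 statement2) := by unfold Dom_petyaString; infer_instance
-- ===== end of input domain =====

-- B replaces A's per-character loop with truncation to the common length and the sign of the built-in lexicographic comparison (idiomatic; same cost).

-- ===== PORT A =====
-- the 'for letter1, letter2 in zip(...)' loop with its early returns
def petyaLoop : List Char → List Char → Int
  | l1 :: r1, l2 :: r2 =>
      if l1 < l2 then -1
      else if l1 > l2 then 1
      else petyaLoop r1 r2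
  | _, _ => 0

def petyaString (statement1 : String) (statement2 : String) : Int :=
  petyaLoop (PySem.Str.lower statement1).toList (PySem.Str.lower statement2).toList

-- ===== PORT B =====
def petyaString_alt (statement1 : String) (statement2 : String) : Int :=
  let s1 := (PySem.Str.lower statement1).toList
  let s2 := (PySem.Str.lower statement2).toList
  let n := min s1.length s2.length
  let a := s1.take n
  let b := s2.take n
  (if a > b then (1 : Int) else 0) - (if a < b then (1 : Int) else 0)

-- ===== PRECONDITION & SPEC =====
def Spec_petyaString (statement1 : String) (statement2 : String) (out : Int) : Prop := out = petyaString_alt statement1 statement2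
instance (statement1 : String) (statement2 : String) (out : Int) : Decidable (Spec_petyaString statement1 statement2 out) := by unfold Spec_petyaString; infer_instance

-- ===== CLAIM (what is proved, stated in full; the proofs are below) =====
def Claim_equal_petyaString : Prop := ∀ (statement1 : String) (statement2 : String), Dom_petyaString statement1 statement2 → Spec_petyaString statement1 statement2 (petyaString statement1 statement2)

-- ===== LEMMAS AND PROOFS =====

theorem petyaLoop_eq_sign (as bs : List Char) :
    petyaLoop as bs =
      (if bs.take (min as.length bs.length) < as.take (min as.length bs.length) then (1 : Int) else 0)
      - (if as.take (min as.length bs.length) < bs.take (min as.length bs.length) then (1 : Int) else 0) := by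
  induction as generalizing bs with
  | nil => simp [petyaLoop]
  | cons a at' ih =>
    cases bs with
    | nil => simp [petyaLoop]
    | cons b bt =>
      have hmin : min (a :: at').length (b :: bt).length = min at'.length bt.length + 1 := by
        simp only [List.length_cons, Nat.succ_min_succ]
      rw [hmin]
      simp only [List.take_succ_cons]
      by_cases h1 : a < b
      · have hnlt : ¬ (b :: bt.take (min at'.length bt.length)) < (a :: at'.take (min at'.length bt.length)) := by
          intro h
          rcases List.cons_lt_cons_iff.mp h with h' | ⟨he, _⟩
          · exact absurd h1 (not_lt_of_gt h')
          · exact absurd h1 (by simp [he])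
        have hlt : (a :: at'.take (min at'.length bt.length)) < (b :: bt.take (min at'.length bt.length)) :=
          List.cons_lt_cons_iff.mpr (Or.inl h1)
        simp [petyaLoop, h1, hnlt, hlt]
      · by_cases h2 : b < a
        · have hnlt : ¬ (a :: at'.take (min at'.length bt.length)) < (b :: bt.take (min at'.length bt.length)) := by
            intro h
            rcases List.cons_lt_cons_iff.mp h with h' | ⟨he, _⟩
            · exact absurd h2 (not_lt_of_gt h')
            · exact absurd h2 (by simp [he])
          have hlt : (b :: bt.take (min at'.length bt.length)) < (a :: at'.take (min at'.length bt.length)) :=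
            List.cons_lt_cons_iff.mpr (Or.inl h2)
          simp [petyaLoop, h1, h2, hnlt, hlt]
        · have he : a = b := le_antisymm (not_lt.mp h2) (not_lt.mp h1)
          subst he
          simp only [petyaLoop, h1, if_false]
          rw [ih bt]
          congr 1 <;> simp

-- ===== VERDICT (by name: the statement is the Claim_ definition above) =====
theorem petyaString_spec : Claim_equal_petyaString := by
  intro s1 s2 _
  show petyaString s1 s2 = petyaString_alt s1 s2
  simp only [petyaString, petyaString_alt, gt_iff_lt]
  exact petyaLoop_eq_sign _ _
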